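-- pv_equiv track=rewrite | github.com/Lakoseee/python | zad4/4.2.py | rysuj_prostokat
-- ===== SOURCE A (Python) =====
-- def rysuj_prostokat(wysokosc, szerokosc):
--     linia = "+---" * szerokosc + "+\n"
--     srodek = "|   " * szerokosc + "|\n"
--
--     prostokat = ""
--     for i in range(wysokosc):
--         prostokat += linia
--         prostokat += srodek
--     prostokat += linia
--
--     return prostokat
-- ===== SOURCE B (Python) =====
-- def rysuj_prostokat(wysokosc, szerokosc):
--     # Character-grid view: the picture is a grid of 2*h+1 rows and 4*w+1 columns
--     # (clamped below at the degenerate single border line); each character is decided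
--     # by a position rule: columns divisible by 4 are joints ('+' on even rows,
--     # '|' on odd rows), the rest are fill ('-' on even rows, ' ' on odd rows).
--     # Only two distinct rows exist (even / odd), so each is rendered once from the
--     # rule and rows are then selected by parity.
--     h = 2 * max(wysokosc, 0) + 1
--     w = 4 * max(szerokosc, 0) + 1
--
--     def cell(r, c):
--         if c % 4 == 0:
--             return '+' if r % 2 == 0 else '|'
--         return '-' if r % 2 == 0 else ' '
--
--     border = ''.join(cell(0, c) for c in range(w)) + '\n'
--     body = ''.join(cell(1, c) for c in range(w)) + '\n'
--     return ''.join(border if r % 2 == 0 else body for r in range(h))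
-- ===== Notes on version B (the rewrite author's own statement) =====
-- stated objective: alternative
-- what changed: B abandons A's template strings and accumulation loop: it views the picture as a (2h+1) x (4w+1) character grid and computes every character independently from its coordinates by a parity/divisibility rule (col%4==0 gives a joint, row%2 picks border vs body), joining the rows once.
import Mathlib
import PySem

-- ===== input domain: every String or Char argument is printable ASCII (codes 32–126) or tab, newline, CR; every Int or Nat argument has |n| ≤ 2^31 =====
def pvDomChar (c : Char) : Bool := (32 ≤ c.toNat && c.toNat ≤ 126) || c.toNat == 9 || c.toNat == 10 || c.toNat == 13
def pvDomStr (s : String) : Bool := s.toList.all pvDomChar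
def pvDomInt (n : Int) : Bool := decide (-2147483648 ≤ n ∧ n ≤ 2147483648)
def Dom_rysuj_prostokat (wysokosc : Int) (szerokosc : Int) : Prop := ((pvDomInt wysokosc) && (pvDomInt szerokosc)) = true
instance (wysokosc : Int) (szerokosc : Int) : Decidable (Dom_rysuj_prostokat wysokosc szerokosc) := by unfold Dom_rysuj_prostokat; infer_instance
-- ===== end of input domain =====

-- B computes the picture as a character grid: each character is a closed-form function
-- of its (row, column) coordinates, instead of A's template strings repeated by a loop.

-- Python's  s * n  on strings (n repetitions, none when n ≤ 0); used by A's code.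
def strMul (s : String) (n : Int) : String := (List.replicate n.toNat s).foldl (fun a b => a ++ b) ""

-- ===== PORT A =====
def rysuj_prostokat (wysokosc : Int) (szerokosc : Int) : String :=
  let linia := strMul "+---" szerokosc ++ "+\n"
  let srodek := strMul "|   " szerokosc ++ "|\n"
  let prostokat :=
    (PySem.List.pyRange 0 wysokosc 1).foldl (fun acc _ => acc ++ linia ++ srodek) ""
  prostokat ++ linia

-- ===== PORT B =====
-- cell(r, c) of Source B
def pvCell (r : Int) (c : Int) : String :=
  if PySem.Int.mod c 4 == 0 then (if PySem.Int.mod r 2 == 0 then "+" else "|")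
  else (if PySem.Int.mod r 2 == 0 then "-" else " ")

-- ''.join(cell(r, c) for c in range(w))
def pvRow (r : Int) (w : Int) : String :=
  (PySem.List.pyRange 0 w 1).foldl (fun acc c => acc ++ pvCell r c) ""

def rysuj_prostokat_alt (wysokosc : Int) (szerokosc : Int) : String :=
  let h := 2 * max wysokosc 0 + 1
  let w := 4 * max szerokosc 0 + 1
  let border := pvRow 0 w ++ "\n"
  let body := pvRow 1 w ++ "\n"
  -- ''.join of the parity-selected rows (= folded concatenation in order)
  (PySem.List.pyRange 0 h 1).foldl
    (fun acc r => acc ++ (if PySem.Int.mod r 2 == 0 then border else body)) ""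

-- ===== PRECONDITION & SPEC =====
def Spec_rysuj_prostokat (wysokosc : Int) (szerokosc : Int) (out : String) : Prop := out = rysuj_prostokat_alt wysokosc szerokosc
instance (wysokosc : Int) (szerokosc : Int) (out : String) : Decidable (Spec_rysuj_prostokat wysokosc szerokosc out) := by unfold Spec_rysuj_prostokat; infer_instance

-- ===== CLAIM (what is proved, stated in full; the proofs are below) =====
def Claim_equal_rysuj_prostokat : Prop := ∀ (wysokosc : Int) (szerokosc : Int), Dom_rysuj_prostokat wysokosc szerokosc → Spec_rysuj_prostokat wysokosc szerokosc (rysuj_prostokat wysokosc szerokosc)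

-- ===== LEMMAS AND PROOFS =====

-- rep n s = s concatenated n times
def rep (n : Nat) (s : String) : String := (List.replicate n s).foldl (fun a b => a ++ b) ""

theorem rep_zero (s : String) : rep 0 s = "" := rfl

-- A string foldl that only appends can be shifted out of its accumulator.
theorem foldl_append_shift {α : Type} (g : α → String) (l : List α) :
    ∀ (a : String), l.foldl (fun acc x => acc ++ g x) a
      = a ++ l.foldl (fun acc x => acc ++ g x) "" := by
  induction l with
  | nil => intro a; simp
  | cons h t ih =>
      intro a
      simp only [List.foldl_cons]
      rw [ih (a ++ g h), ih (("" : String) ++ g h)]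
      simp [String.append_assoc]

theorem rep_succ_front (n : Nat) (s : String) : rep (n + 1) s = s ++ rep n s := by
  simp only [rep, List.replicate_succ, List.foldl_cons]
  rw [foldl_append_shift (fun b => b) (List.replicate n s) (("" : String) ++ s)]
  simp

theorem rep_succ_back (n : Nat) (s : String) : rep (n + 1) s = rep n s ++ s := by
  simp only [rep, List.replicate_succ', List.foldl_append, List.foldl_cons, List.foldl_nil]

-- the rotation identity: (a++b)^n ++ a = a ++ (b++a)^n
theorem rep_rotate (n : Nat) (a b : String) :
    rep n (a ++ b) ++ a = a ++ rep n (b ++ a) := by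
  induction n with
  | zero => simp [rep_zero]
  | succ m ih =>
      rw [rep_succ_front m (a ++ b), rep_succ_front m (b ++ a)]
      rw [String.append_assoc, ih]
      simp [String.append_assoc]

-- strMul is rep
theorem strMul_eq_rep (s : String) (n : Int) : strMul s n = rep n.toNat s := rfl

-- A's loop appends a fixed block once per range element.
theorem a_loop_eq_rep (w : Int) (x y : String) :
    (PySem.List.pyRange 0 w 1).foldl (fun acc _ => acc ++ x ++ y) ""
      = rep w.toNat (x ++ y) := by
  have h : ∀ (l : List Int) (a : String),
      l.foldl (fun acc _ => acc ++ x ++ y) a = a ++ rep l.length (x ++ y) := by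
    intro l
    induction l with
    | nil => intro a; simp [rep_zero]
    | cons h t ih =>
        intro a
        simp only [List.foldl_cons, List.length_cons]
        rw [ih, rep_succ_front]
        simp [String.append_assoc]
  rw [h]
  simp [PySem.List.length_pyRange_one]

-- row lemma, even rows: the row over 4*S+1 columns is "+" ++ ("---+")^S
theorem pvRow_even (r : Int) (hr : PySem.Int.mod r 2 = 0) (S : Nat) :
    pvRow r (4 * (S : Int) + 1) = "+" ++ rep S "---+" := by
  induction S with
  | zero =>
      have h1 : PySem.List.pyRange 0 1 1 = [0] := by
        rw [show (1:Int) = 0 + 1 by norm_num]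
        exact PySem.List.pyRange_one_singleton 0
      simp only [pvRow, Nat.cast_zero, mul_zero, zero_add]
      rw [h1]
      have hr2 : 2 ∣ r := (PySem.Int.mod_eq_zero_iff_dvd r 2).mp hr
      simp [pvCell, PySem.Int.mod_eq_zero_iff_dvd, hr2, rep_zero]
  | succ m ih =>
      have hsplit : PySem.List.pyRange 0 (4 * ((m : Int) + 1) + 1) 1
          = PySem.List.pyRange 0 (4 * (m : Int) + 1) 1
            ++ PySem.List.pyRange (4 * (m : Int) + 1) (4 * (m : Int) + 5) 1 := by
        have h := PySem.List.pyRange_one_append 0 (4 * (m : Int) + 1) (4 * (m : Int) + 5)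
          (by positivity) (by omega)
        rw [show 4 * ((m : Int) + 1) + 1 = 4 * (m : Int) + 5 by ring]
        exact h
      have htail : PySem.List.pyRange (4 * (m : Int) + 1) (4 * (m : Int) + 5) 1
          = [4 * (m : Int) + 1, 4 * (m : Int) + 2, 4 * (m : Int) + 3, 4 * (m : Int) + 4] := by
        rw [PySem.List.pyRange_one_cons (by omega), PySem.List.pyRange_one_cons (by omega),
            PySem.List.pyRange_one_cons (by omega), PySem.List.pyRange_one_cons (by omega),
            PySem.List.pyRange_one_eq_nil (by omega)]
        norm_num
        omega
      have hr2 : 2 ∣ r := (PySem.Int.mod_eq_zero_iff_dvd r 2).mp hr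
      simp only [pvRow, Nat.cast_succ] at *
      rw [hsplit, List.foldl_append]
      rw [show (PySem.List.pyRange 0 (4 * (m:Int) + 1) 1).foldl
            (fun acc c => acc ++ pvCell r c) "" = pvRow r (4 * (m:Int) + 1) from rfl] at *
      rw [ih, htail]
      simp only [List.foldl_cons, List.foldl_nil]
      have c1 : pvCell r (4 * (m : Int) + 1) = "-" := by
        have : ¬ (4 ∣ (4 * (m : Int) + 1)) := by omega
        simp [pvCell, PySem.Int.mod_eq_zero_iff_dvd, this, hr2]
      have c2 : pvCell r (4 * (m : Int) + 2) = "-" := by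
        have : ¬ (4 ∣ (4 * (m : Int) + 2)) := by omega
        simp [pvCell, PySem.Int.mod_eq_zero_iff_dvd, this, hr2]
      have c3 : pvCell r (4 * (m : Int) + 3) = "-" := by
        have : ¬ (4 ∣ (4 * (m : Int) + 3)) := by omega
        simp [pvCell, PySem.Int.mod_eq_zero_iff_dvd, this, hr2]
      have c4 : pvCell r (4 * (m : Int) + 4) = "+" := by
        have : (4 ∣ (4 * (m : Int) + 4)) := by omega
        simp [pvCell, PySem.Int.mod_eq_zero_iff_dvd, this, hr2]
      rw [c1, c2, c3, c4, rep_succ_back]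
      simp [String.append_assoc]

-- row lemma, odd rows
theorem pvRow_odd (r : Int) (hr : PySem.Int.mod r 2 = 1) (S : Nat) :
    pvRow r (4 * (S : Int) + 1) = "|" ++ rep S "   |" := by
  induction S with
  | zero =>
      have h1 : PySem.List.pyRange 0 1 1 = [0] := by
        rw [show (1:Int) = 0 + 1 by norm_num]
        exact PySem.List.pyRange_one_singleton 0
      simp only [pvRow, Nat.cast_zero, mul_zero, zero_add]
      rw [h1]
      have hr2 : ¬ (2 ∣ r) := by
        intro h
        have := (PySem.Int.mod_eq_zero_iff_dvd r 2).mpr h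
        rw [hr] at this; exact one_ne_zero this
      simp [pvCell, PySem.Int.mod_eq_zero_iff_dvd, hr2, rep_zero]
  | succ m ih =>
      have hsplit : PySem.List.pyRange 0 (4 * ((m : Int) + 1) + 1) 1
          = PySem.List.pyRange 0 (4 * (m : Int) + 1) 1
            ++ PySem.List.pyRange (4 * (m : Int) + 1) (4 * (m : Int) + 5) 1 := by
        have h := PySem.List.pyRange_one_append 0 (4 * (m : Int) + 1) (4 * (m : Int) + 5)
          (by positivity) (by omega)
        rw [show 4 * ((m : Int) + 1) + 1 = 4 * (m : Int) + 5 by ring]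
        exact h
      have htail : PySem.List.pyRange (4 * (m : Int) + 1) (4 * (m : Int) + 5) 1
          = [4 * (m : Int) + 1, 4 * (m : Int) + 2, 4 * (m : Int) + 3, 4 * (m : Int) + 4] := by
        rw [PySem.List.pyRange_one_cons (by omega), PySem.List.pyRange_one_cons (by omega),
            PySem.List.pyRange_one_cons (by omega), PySem.List.pyRange_one_cons (by omega),
            PySem.List.pyRange_one_eq_nil (by omega)]
        norm_num
        omega
      have hr2 : ¬ (2 ∣ r) := by
        intro h
        have := (PySem.Int.mod_eq_zero_iff_dvd r 2).mpr h
        rw [hr] at this; exact one_ne_zero this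
      simp only [pvRow, Nat.cast_succ] at *
      rw [hsplit, List.foldl_append]
      rw [show (PySem.List.pyRange 0 (4 * (m:Int) + 1) 1).foldl
            (fun acc c => acc ++ pvCell r c) "" = pvRow r (4 * (m:Int) + 1) from rfl] at *
      rw [ih, htail]
      simp only [List.foldl_cons, List.foldl_nil]
      have c1 : pvCell r (4 * (m : Int) + 1) = " " := by
        have : ¬ (4 ∣ (4 * (m : Int) + 1)) := by omega
        simp [pvCell, PySem.Int.mod_eq_zero_iff_dvd, this, hr2]
      have c2 : pvCell r (4 * (m : Int) + 2) = " " := by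
        have : ¬ (4 ∣ (4 * (m : Int) + 2)) := by omega
        simp [pvCell, PySem.Int.mod_eq_zero_iff_dvd, this, hr2]
      have c3 : pvCell r (4 * (m : Int) + 3) = " " := by
        have : ¬ (4 ∣ (4 * (m : Int) + 3)) := by omega
        simp [pvCell, PySem.Int.mod_eq_zero_iff_dvd, this, hr2]
      have c4 : pvCell r (4 * (m : Int) + 4) = "|" := by
        have : (4 ∣ (4 * (m : Int) + 4)) := by omega
        simp [pvCell, PySem.Int.mod_eq_zero_iff_dvd, this, hr2]
      rw [c1, c2, c3, c4, rep_succ_back]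
      simp [String.append_assoc]

-- mod-2 of concrete even/odd integers
theorem mod_two_even (k : Int) : PySem.Int.mod (2 * k) 2 = 0 := by
  rw [PySem.Int.mod_eq_emod_of_pos (by norm_num)]; omega
theorem mod_two_odd (k : Int) : PySem.Int.mod (2 * k + 1) 2 = 1 := by
  rw [PySem.Int.mod_eq_emod_of_pos (by norm_num)]; omega

-- B's outer fold over 2*W+1 rows (selecting L on even rows, M on odd) equals L ++ (M ++ L)^W.
theorem b_loop_eq (L M : String) (W : Nat) :
    (PySem.List.pyRange 0 (2 * (W : Int) + 1) 1).foldl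
        (fun acc r => acc ++ (if PySem.Int.mod r 2 == 0 then L else M)) ""
      = L ++ rep W (M ++ L) := by
  induction W with
  | zero =>
      rw [show (2 * ((0:Nat) : Int) + 1) = 0 + 1 by norm_num,
          PySem.List.pyRange_one_singleton]
      simp [rep_zero, mod_two_even 0]
  | succ m ih =>
      have hsplit : PySem.List.pyRange 0 (2 * ((m : Int) + 1) + 1) 1
          = PySem.List.pyRange 0 (2 * (m : Int) + 1) 1
            ++ [2 * (m : Int) + 1, 2 * (m : Int) + 2] := by
        have h := PySem.List.pyRange_one_append 0 (2 * (m : Int) + 1) (2 * (m : Int) + 3)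
          (by positivity) (by omega)
        rw [show 2 * ((m : Int) + 1) + 1 = 2 * (m : Int) + 3 by ring, h]
        congr 1
        rw [PySem.List.pyRange_one_cons (by omega), PySem.List.pyRange_one_cons (by omega),
            PySem.List.pyRange_one_eq_nil (by omega)]
        norm_num
        omega
      simp only [Nat.cast_succ]
      rw [hsplit, List.foldl_append, ih]
      simp only [List.foldl_cons, List.foldl_nil]
      have e1 : PySem.Int.mod (2 * (m : Int) + 1) 2 = 1 := mod_two_odd (m : Int)
      have e2 : PySem.Int.mod (2 * (m : Int) + 2) 2 = 0 := by
        rw [show 2 * (m : Int) + 2 = 2 * ((m : Int) + 1) by ring]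
        exact mod_two_even ((m : Int) + 1)
      rw [e1, e2, rep_succ_back]
      simp [String.append_assoc]

-- ===== VERDICT (by name: the statement is the Claim_ definition above) =====
theorem rysuj_prostokat_spec : Claim_equal_rysuj_prostokat := by
  intro w s _
  show rysuj_prostokat w s = rysuj_prostokat_alt w s
  simp only [rysuj_prostokat, rysuj_prostokat_alt]
  -- normalize the B-side bounds to casts of toNat
  have hw : 2 * max w 0 + 1 = 2 * ((w.toNat : Int)) + 1 := by omega
  have hs : 4 * max s 0 + 1 = 4 * ((s.toNat : Int)) + 1 := by omega
  rw [hw, hs, b_loop_eq (pvRow 0 (4 * ((s.toNat : Int)) + 1) ++ "\n") (pvRow 1 (4 * ((s.toNat : Int)) + 1) ++ "\n"), a_loop_eq_rep]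
  rw [pvRow_even 0 (by rw [show (0:Int) = 2*0 by norm_num]; exact mod_two_even 0) s.toNat,
      pvRow_odd 1 (by rw [show (1:Int) = 2*0+1 by norm_num]; exact mod_two_odd 0) s.toNat]
  rw [strMul_eq_rep, strMul_eq_rep]
  -- rotate the border/body templates: x^n ++ t = t' ++ y^n for the literal pieces
  have hlinia : rep s.toNat "+---" ++ "+\n" = ("+" ++ rep s.toNat "---+") ++ "\n" := by
    have := rep_rotate s.toNat "+" "---"
    rw [show ("+" : String) ++ "---" = "+---" from rfl] at this
    rw [show ("+\n" : String) = "+" ++ "\n" from rfl, ← String.append_assoc, this]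
    rw [show ("---" : String) ++ "+" = "---+" from rfl]
  have hsrodek : rep s.toNat "|   " ++ "|\n" = ("|" ++ rep s.toNat "   |") ++ "\n" := by
    have := rep_rotate s.toNat "|" "   "
    rw [show ("|" : String) ++ "   " = "|   " from rfl] at this
    rw [show ("|\n" : String) = "|" ++ "\n" from rfl, ← String.append_assoc, this]
    rw [show ("   " : String) ++ "|" = "   |" from rfl]
  rw [hlinia, hsrodek]
  -- A = (L++M)^W ++ L, B = L ++ (M++L)^W
  rw [← rep_rotate w.toNat]
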